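-- pv_equiv track=rewrite | github.com/peknight/docker | scripts/update-docker-images.py | find_latest_simple_version
-- ===== SOURCE A (Python) =====
-- def is_prerelease(version: str) -> bool:
--     """判断版本是否为预发布版本。"""
--     markers = ["rc", "m", "snapshot", "snap", "alpha", "beta", "cr", "dev", "beta", "pre"]
--     lower = version.lower()
--     for m in markers:
--         if f"-{m}" in lower or lower.startswith(m):
--             return True
--     return False
--
-- def parse_version_tuple(version: str) -> tuple:
--     """将版本号字符串解析为可比较的 tuple。"""
--     parts = []
--     for p in version.split("."):
--         try:
--             parts.append(int(p))
--         except ValueError: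
--             num = ""
--             for c in p:
--                 if c.isdigit():
--                     num += c
--                 else:
--                     break
--             parts.append(int(num) if num else 0)
--     return tuple(parts)
--
-- def is_version_newer(current: str, candidate: str) -> bool:
--     """判断 candidate 版本是否严格高于 current 版本。"""
--     cur = parse_version_tuple(current)
--     cand = parse_version_tuple(candidate)
--     min_len = min(len(cur), len(cand))
--     return cand[:min_len] > cur[:min_len]
--
-- def find_latest_simple_version(tags: list[dict], current: str) -> str | None:
--     """简单版本号匹配：取最新稳定版。
--
--     适用于: alpine, mysql, ubuntu, ollama, rustdesk-server 等
--     """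
--     versions = [t["name"] for t in tags if t.get("name")]
--     if not versions:
--         return None
--
--     if is_prerelease(current):
--         versions.sort(key=parse_version_tuple, reverse=True)
--         latest = versions[0]
--         if is_version_newer(current, latest):
--             return latest
--     else:
--         stable = [v for v in versions if not is_prerelease(v)]
--         if not stable:
--             return None
--         stable.sort(key=parse_version_tuple, reverse=True)
--         latest = stable[0]
--         if is_version_newer(current, latest):
--             return latest
--     return None
-- ===== SOURCE B (Python) =====
-- from functools import reduce
--
-- _MARKERS = ["rc", "m", "snapshot", "snap", "alpha", "beta", "cr", "dev", "beta", "pre"]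
--
-- def _is_pre(version):
--     low = version.lower()
--     return reduce(lambda acc, m: acc or ("-" + m) in low or low.startswith(m),
--                   _MARKERS, False)
--
-- def _part_value(p):
--     try:
--         return int(p)
--     except ValueError:
--         i = 0
--         while i < len(p) and p[i].isdigit():
--             i += 1
--         return int(p[:i]) if i else 0
--
-- def _key(version):
--     return tuple(_part_value(p) for p in version.split("."))
--
-- def _newer(cur, cand):
--     # pairwise lexicographic comparison, truncated to the shorter tuple
--     for a, b in zip(cur, cand):
--         if a != b:
--             return a < b
--     return False
--
-- def find_latest_simple_version(tags, current):
--     versions = []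
--     for t in tags:
--         name = t.get("name")
--         if name:
--             versions.append(name)
--     pool = versions if _is_pre(current) else [v for v in versions if not _is_pre(v)]
--     best = None
--     for v in pool:
--         if _newer(_key(current), _key(v)) and (best is None or _key(best) < _key(v)):
--             best = v
--     return best
-- ===== Notes on version B (the rewrite author's own statement) =====
-- stated objective: alternative
-- what changed: Replaces A's two sort-descending-then-test-the-top branches by a single fused pass: choose the pool (all versions for a prerelease current, stable-only otherwise) and keep a running best over it, admitting only versions strictly newer than current; the helpers are also re-decomposed (reduce instead of any over the markers, a while-loop digit counter instead of for/break, a pairwise zip walk instead of tuple-slice comparison).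
import Mathlib
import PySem

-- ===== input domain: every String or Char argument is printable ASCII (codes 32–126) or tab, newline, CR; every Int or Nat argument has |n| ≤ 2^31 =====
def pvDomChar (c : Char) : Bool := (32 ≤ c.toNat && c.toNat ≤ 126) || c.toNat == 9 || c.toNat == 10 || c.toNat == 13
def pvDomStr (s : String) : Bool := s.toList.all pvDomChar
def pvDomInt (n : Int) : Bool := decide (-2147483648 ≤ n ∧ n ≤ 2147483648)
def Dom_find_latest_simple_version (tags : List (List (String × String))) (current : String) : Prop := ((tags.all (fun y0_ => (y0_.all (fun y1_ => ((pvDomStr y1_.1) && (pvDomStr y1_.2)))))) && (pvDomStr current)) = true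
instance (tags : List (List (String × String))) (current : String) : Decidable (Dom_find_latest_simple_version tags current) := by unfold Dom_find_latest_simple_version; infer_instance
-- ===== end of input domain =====

-- B fuses A's two sort-descending-then-test-the-top branches into one single pass: it keeps a running
-- best over the pool, admitting only versions strictly newer than current (alternative decomposition).

-- ===== PORT A =====

def pvMarkers : List String := ["rc", "m", "snapshot", "snap", "alpha", "beta", "cr", "dev", "beta", "pre"]

def is_prerelease (version : String) : Bool :=
  let lower := PySem.Str.lower version
  pvMarkers.any (fun m => PySem.Str.isIn ("-" ++ m) lower || PySem.Str.startswith lower m)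

def parse_version_tuple (version : String) : List Int :=
  ((PySem.Str.split? version ".").getD []).map (fun p =>
    match PySem.Int.ofStr? p with
    | some n => n
    | none =>
      -- inner loop: collect the leading digit prefix of p, stop at the first non-digit
      let num := p.toList.takeWhile PySem.Chars.isdigit
      if num.isEmpty then 0 else (PySem.Int.ofChars? num).getD 0)

def is_version_newer (current candidate : String) : Bool :=
  let cur := parse_version_tuple current
  let cand := parse_version_tuple candidate
  let min_len := min cur.length cand.length
  -- Python tuple '>' is lexicographic, exactly List Int's '<' (ported by hand: exact on Int lists)
  decide (cur.take min_len < cand.take min_len)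

-- [t["name"] for t in tags if t.get("name")]
def pvVersions (tags : List (List (String × String))) : List String :=
  tags.filterMap (fun t =>
    match (PySem.Dict.mk t).get? "name" with
    | some s => if s == "" then none else some s
    | none => none)

def find_latest_simple_version (tags : List (List (String × String))) (current : String) : Option String :=
  let versions := pvVersions tags
  if versions.isEmpty then none
  else if is_prerelease current then
    match PySem.List.sorted versions parse_version_tuple true with
    | [] => none
    | latest :: _ => if is_version_newer current latest then some latest else none
  else
    let stable := versions.filter (fun v => !is_prerelease v)
    if stable.isEmpty then none
    else
      match PySem.List.sorted stable parse_version_tuple true with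
      | [] => none
      | latest :: _ => if is_version_newer current latest then some latest else none

-- ===== PORT B =====

def altMarkers : List String := ["rc", "m", "snapshot", "snap", "alpha", "beta", "cr", "dev", "beta", "pre"]

-- _is_pre: a reduce (left fold) over the markers with a Bool accumulator
def altPre (version : String) : Bool :=
  let low := PySem.Str.lower version
  altMarkers.foldl (fun acc m => acc || PySem.Str.isIn ("-" ++ m) low || PySem.Str.startswith low m) false

-- _part_value's while loop: count the leading digits, then slice p[:i]
def altDigitPrefixLen : List Char → Nat
  | [] => 0
  | c :: rest => if PySem.Chars.isdigit c then altDigitPrefixLen rest + 1 else 0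

def altPartVal (p : String) : Int :=
  match PySem.Int.ofStr? p with
  | some n => n
  | none =>
    let i := altDigitPrefixLen p.toList
    if i = 0 then 0 else (PySem.Int.ofChars? (p.toList.take i)).getD 0

-- _key: explicit recursion over the split parts
def altKeyParts : List String → List Int
  | [] => []
  | p :: rest => altPartVal p :: altKeyParts rest

def altKey (version : String) : List Int :=
  altKeyParts ((PySem.Str.split? version ".").getD [])

-- _newer: pairwise walk over the zipped tuples, truncating at the shorter one
def altNewer : List Int → List Int → Bool
  | a :: as_, b :: bs => if a = b then altNewer as_ bs else decide (a < b)
  | _, _ => false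

-- the versions-collecting loop, as structural recursion
def altVersions : List (List (String × String)) → List String
  | [] => []
  | t :: rest =>
    match (PySem.Dict.mk t).get? "name" with
    | some name => if name == "" then altVersions rest else name :: altVersions rest
    | none => altVersions rest

def find_latest_simple_version_alt (tags : List (List (String × String))) (current : String) : Option String :=
  let versions := altVersions tags
  let pool := if altPre current then versions else versions.filter (fun v => !altPre v)
  pool.foldl (fun best v =>
    if altNewer (altKey current) (altKey v) &&
       (match best with
        | none => true
        | some b => decide (altKey b < altKey v))
    then some v else best) none

-- ===== PRECONDITION & SPEC =====
def Spec_find_latest_simple_version (tags : List (List (String × String))) (current : String) (out : Option String) : Prop := out = find_latest_simple_version_alt tags current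
instance (tags : List (List (String × String))) (current : String) (out : Option String) : Decidable (Spec_find_latest_simple_version tags current out) := by unfold Spec_find_latest_simple_version; infer_instance

-- ===== CLAIM (what is proved, stated in full; the proofs are below) =====
def Claim_equal_find_latest_simple_version : Prop := ∀ (tags : List (List (String × String))) (current : String), Dom_find_latest_simple_version tags current → Spec_find_latest_simple_version tags current (find_latest_simple_version tags current)

-- ===== LEMMAS AND PROOFS =====

-- ---- B's helpers compute A's helpers ----

theorem pv_foldl_or {α : Type} (p q : α → Bool) :
    ∀ (l : List α) (b : Bool),
      l.foldl (fun acc x => acc || p x || q x) b = (b || l.any (fun x => p x || q x)) := by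
  intro l
  induction l with
  | nil => intro b; simp
  | cons x t ih => intro b; rw [List.foldl_cons, ih]; simp [Bool.or_assoc]

theorem altPre_eq (v : String) : altPre v = is_prerelease v := by
  unfold altPre is_prerelease altMarkers pvMarkers
  dsimp only
  rw [pv_foldl_or]
  simp

theorem altDigitPrefixLen_take (l : List Char) :
    l.take (altDigitPrefixLen l) = l.takeWhile PySem.Chars.isdigit := by
  induction l with
  | nil => rfl
  | cons c rest ih =>
    by_cases h : PySem.Chars.isdigit c
    · simp [altDigitPrefixLen, h, ih]
    · simp [altDigitPrefixLen, h]

theorem altDigitPrefixLen_zero_iff (l : List Char) :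
    altDigitPrefixLen l = 0 ↔ (l.takeWhile PySem.Chars.isdigit).isEmpty = true := by
  cases l with
  | nil => simp [altDigitPrefixLen]
  | cons c rest =>
    by_cases h : PySem.Chars.isdigit c
    · simp [altDigitPrefixLen, h]
    · simp [altDigitPrefixLen, h]

theorem altPartVal_eq (p : String) :
    altPartVal p = (match PySem.Int.ofStr? p with
      | some n => n
      | none =>
        let num := p.toList.takeWhile PySem.Chars.isdigit
        if num.isEmpty then 0 else (PySem.Int.ofChars? num).getD 0) := by
  unfold altPartVal
  cases h : PySem.Int.ofStr? p with
  | some n => rfl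
  | none =>
    simp only []
    by_cases hz : altDigitPrefixLen p.toList = 0
    · rw [if_pos hz, if_pos ((altDigitPrefixLen_zero_iff _).mp hz)]
    · rw [if_neg hz, altDigitPrefixLen_take,
        if_neg (fun he => hz ((altDigitPrefixLen_zero_iff _).mpr he))]

theorem altKey_eq (v : String) : altKey v = parse_version_tuple v := by
  unfold altKey parse_version_tuple
  induction ((PySem.Str.split? v ".").getD []) with
  | nil => rfl
  | cons p rest ih => simp [altKeyParts, ih, altPartVal_eq p]

theorem altNewer_eq : ∀ (cur cand : List Int),
    altNewer cur cand = decide (cur.take (min cur.length cand.length) < cand.take (min cur.length cand.length)) := by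
  intro cur
  induction cur with
  | nil =>
    intro cand
    simp [altNewer]
  | cons a as_ ih =>
    intro cand
    cases cand with
    | nil => simp [altNewer]
    | cons b bs =>
      simp only [altNewer, List.length_cons, Nat.succ_min_succ, List.take_succ_cons]
      by_cases hab : a = b
      · subst hab
        rw [if_pos rfl, ih bs]
        simp
      · rw [if_neg hab]
        rcases lt_trichotomy a b with h | h | h
        · simp [List.cons_lt_cons_iff, h]
        · exact absurd h hab
        · simp [List.cons_lt_cons_iff, not_lt.mpr h.le, hab]

theorem altNewer_key_eq (c v : String) :
    altNewer (parse_version_tuple c) (parse_version_tuple v) = is_version_newer c v := by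
  rw [altNewer_eq]; rfl

theorem altVersions_eq (tags : List (List (String × String))) :
    altVersions tags = pvVersions tags := by
  induction tags with
  | nil => rfl
  | cons t rest ih =>
    unfold altVersions pvVersions
    cases h : (PySem.Dict.mk t).get? "name" with
    | none => simp [h, ih, pvVersions]
    | some s =>
      by_cases hs : s = ""
      · simp [h, hs, ih, pvVersions]
      · simp [h, hs, ih, pvVersions]

-- ---- instance bookkeeping: core's List.decidableLT vs the LinearOrder's ----
theorem pv_dlt_eq : (fun (a b : List Int) => a.decidableLT b) = (LinearOrder.toDecidableLT (α := List Int)) := by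
  funext a b; exact Subsingleton.elim _ _

theorem pv_sorted_eq (xs : List String) (rev : Bool) :
    PySem.List.sorted xs parse_version_tuple rev
      = @PySem.List.sorted String (List Int) List.instLinearOrder.toLT LinearOrder.toDecidableLT xs parse_version_tuple rev := by
  rw [pv_dlt_eq]

-- Python tuple-prefix comparison transfers upward along the lexicographic order:
-- if candidate x beats current c (after truncation) and x ≤ y, then y beats c too.
theorem pv_lex_take_trans : ∀ (c x y : List Int),
    c.take (min c.length x.length) < x.take (min c.length x.length) →
    (x < y ∨ x = y) →
    c.take (min c.length y.length) < y.take (min c.length y.length) := by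
  intro c
  induction c with
  | nil =>
    intro x y h1 _
    simp only [List.length_nil, Nat.zero_min, List.take_zero] at h1
    exact absurd h1 (List.not_lt_nil _)
  | cons c0 cs ih =>
    intro x y h1 h2
    cases x with
    | nil =>
      simp only [List.length_nil, Nat.min_zero, List.take_zero] at h1
      exact absurd h1 (List.not_lt_nil _)
    | cons x0 xt =>
      cases y with
      | nil =>
        rcases h2 with h2 | h2
        · exact absurd h2 (List.not_lt_nil _)
        · simp at h2
      | cons y0 yt =>
        simp only [List.length_cons, Nat.succ_min_succ, List.take_succ_cons] at h1 ⊢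
        rw [List.cons_lt_cons_iff] at h1 ⊢
        have hxy : x0 < y0 ∨ (x0 = y0 ∧ (xt < yt ∨ xt = yt)) := by
          rcases h2 with h2 | h2
          · rw [List.cons_lt_cons_iff] at h2
            rcases h2 with h2 | ⟨he, ht⟩
            · exact Or.inl h2
            · exact Or.inr ⟨he, Or.inl ht⟩
          · rw [List.cons.injEq] at h2
            exact Or.inr ⟨h2.1, Or.inr h2.2⟩
        rcases h1 with h1 | ⟨hce, hct⟩
        · rcases hxy with h | ⟨he, _⟩
          · exact Or.inl (lt_trans h1 h)
          · exact Or.inl (he ▸ h1)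
        · rcases hxy with h | ⟨he, ht⟩
          · exact Or.inl (hce ▸ h)
          · exact Or.inr ⟨hce.trans he, ih xt yt hct ht⟩

-- the fold step of PySem.List.max?
def pvStep {α κ : Type} [LinearOrder κ] (key : α → κ) (acc : Option α) (x : α) : Option α :=
  match acc with
  | none => some x
  | some m => if key m < key x then some x else some m

theorem pv_max?_eq_foldl {α κ : Type} [LinearOrder κ] (xs : List α) (key : α → κ) :
    PySem.List.max? xs key = xs.foldl (pvStep key) none := rfl

theorem pv_foldl_step_const {α κ : Type} [LinearOrder κ] (key : α → κ) (m : α) :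
    ∀ (l : List α), (∀ y ∈ l, key y ≤ key m) → l.foldl (pvStep key) (some m) = some m := by
  intro l
  induction l with
  | nil => intro _; rfl
  | cons x t ih =>
    intro h
    have hx : ¬ key m < key x := not_lt.mpr (h x List.mem_cons_self)
    simp only [List.foldl_cons, pvStep, if_neg hx]
    exact ih (fun y hy => h y (List.mem_cons_of_mem _ hy))


-- introduction: a first-max decomposition computes max?
theorem pv_max?_of_decomp {α κ : Type} [LinearOrder κ] (key : α → κ) (l1 l2 : List α) (m : α)
    (h1 : ∀ y ∈ l1, key y < key m) (h2 : ∀ y ∈ l2, key y ≤ key m) :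
    PySem.List.max? (l1 ++ m :: l2) key = some m := by
  rw [pv_max?_eq_foldl, List.foldl_append]
  have hcase : l1.foldl (pvStep key) none = none ∨
      ∃ z, l1.foldl (pvStep key) none = some z ∧ z ∈ l1 := by
    rcases h : l1.foldl (pvStep key) none with _ | z
    · exact Or.inl rfl
    · refine Or.inr ⟨z, rfl, PySem.List.max?_mem (show PySem.List.max? l1 key = some z from ?_)⟩
      rw [pv_max?_eq_foldl]; exact h
  rcases hcase with h | ⟨z, h, hz⟩
  · rw [h]
    simp only [List.foldl_cons, pvStep]
    exact pv_foldl_step_const key m l2 h2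
  · rw [h]
    have hlt : key z < key m := h1 z hz
    simp only [List.foldl_cons, pvStep, if_pos hlt]
    exact pv_foldl_step_const key m l2 h2

-- elimination: a foldl with a some-start yields the start or a later first-strict-improvement
theorem pv_foldl_step_decomp {α κ : Type} [LinearOrder κ] (key : α → κ) :
    ∀ (rest : List α) (a m : α), rest.foldl (pvStep key) (some a) = some m →
      m = a ∨ ∃ l1 l2, rest = l1 ++ m :: l2 ∧ key a < key m ∧ ∀ y ∈ l1, key y < key m := by
  intro rest
  induction rest with
  | nil => intro a m h; exact Or.inl (by simpa using (Option.some.inj h).symm)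
  | cons x t ih =>
    intro a m h
    simp only [List.foldl_cons, pvStep] at h
    by_cases hax : key a < key x
    · rw [if_pos hax] at h
      rcases ih x m h with h' | ⟨l1, l2, he, hk, hall⟩
      · subst h'
        exact Or.inr ⟨[], t, by simp, hax, by simp⟩
      · exact Or.inr ⟨x :: l1, l2, by simp [he], lt_trans hax hk,
          fun y hy => by
            rcases List.mem_cons.mp hy with rfl | hy
            · exact hk
            · exact hall y hy⟩
    · rw [if_neg hax] at h
      rcases ih a m h with h' | ⟨l1, l2, he, hk, hall⟩
      · exact Or.inl h'
      · exact Or.inr ⟨x :: l1, l2, by simp [he], hk,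
          fun y hy => by
            rcases List.mem_cons.mp hy with rfl | hy
            · exact lt_of_le_of_lt (not_lt.mp hax) hk
            · exact hall y hy⟩

theorem pv_max?_decomp {α κ : Type} [LinearOrder κ] (key : α → κ) (xs : List α) (m : α)
    (h : PySem.List.max? xs key = some m) :
    ∃ l1 l2, xs = l1 ++ m :: l2 ∧ ∀ y ∈ l1, key y < key m := by
  cases xs with
  | nil => simp [PySem.List.max?] at h
  | cons x rest =>
    rw [pv_max?_eq_foldl] at h
    simp only [List.foldl_cons, pvStep] at h
    rcases pv_foldl_step_decomp key rest x m h with h' | ⟨l1, l2, he, hk, hall⟩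
    · subst h'
      exact ⟨[], rest, by simp, by simp⟩
    · exact ⟨x :: l1, l2, by simp [he], fun y hy => by
        rcases List.mem_cons.mp hy with rfl | hy
        · exact hk
        · exact hall y hy⟩

-- the first max survives filtering, provided it passes the filter
theorem pv_max?_filter {α κ : Type} [LinearOrder κ] (key : α → κ) (p : α → Bool) (xs : List α) (m : α)
    (h : PySem.List.max? xs key = some m) (hp : p m = true) :
    PySem.List.max? (xs.filter p) key = some m := by
  rcases pv_max?_decomp key xs m h with ⟨l1, l2, he, hlt⟩
  have hmax := PySem.List.max?_isMax h
  subst he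
  rw [List.filter_append, List.filter_cons_of_pos hp]
  exact pv_max?_of_decomp key _ _ m
    (fun y hy => hlt y (List.mem_of_mem_filter hy))
    (fun y hy => hmax y (by
      have := List.mem_of_mem_filter hy
      simp only [List.mem_append, List.mem_cons]
      exact Or.inr (Or.inr this)))

-- the head of the reverse sort is the first maximum
theorem pv_max?_eq_head_sorted_rev {α κ : Type} [LinearOrder κ] (key : α → κ) :
    ∀ (xs : List α) (m : α) (t : List α),
      PySem.List.sorted xs key true = m :: t → PySem.List.max? xs key = some m := by
  intro xs
  induction xs using List.reverseRecOn with
  | nil => intro m t h; simp [PySem.List.sorted] at h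
  | append_singleton ys x ih =>
    intro m t h
    have hs : PySem.List.sorted (ys ++ [x]) key true
        = PySem.List.insertBy (fun a b => decide (key b < key a)) x (PySem.List.sorted ys key true) := by
      simp [PySem.List.sorted, List.foldl_append]
    rw [hs] at h
    rw [pv_max?_eq_foldl, List.foldl_append, ← pv_max?_eq_foldl]
    rcases hys : PySem.List.sorted ys key true with _ | ⟨m', t'⟩
    · have : ys = [] := (PySem.List.sorted_eq_nil_iff ys key true).mp hys
      subst this
      rw [hys] at h
      simp only [PySem.List.insertBy] at h
      rw [List.cons.injEq] at h
      rw [h.1] at *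
      simp [PySem.List.max?, pvStep]
    · rw [hys] at h
      have hM' := ih m' t' hys
      rw [hM']
      by_cases hlt : key m' < key x
      · simp only [PySem.List.insertBy, decide_eq_true_eq, if_pos hlt] at h
        rw [List.cons.injEq] at h
        rw [← h.1]
        simp [List.foldl_cons, pvStep, if_pos hlt]
      · simp only [PySem.List.insertBy, decide_eq_true_eq, if_neg hlt] at h
        rw [List.cons.injEq] at h
        rw [← h.1]
        simp [List.foldl_cons, pvStep, if_neg hlt]

-- B's fused pass = filter then the max?-fold
theorem pv_fused_foldl (current : String) :
    ∀ (pool : List String) (acc : Option String),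
      pool.foldl (fun best v =>
        if is_version_newer current v &&
           (match best with
            | none => true
            | some b => decide (parse_version_tuple b < parse_version_tuple v))
        then some v else best) acc
      = (pool.filter (fun v => is_version_newer current v)).foldl
          (@pvStep String (List Int) _ parse_version_tuple) acc := by
  intro pool
  induction pool with
  | nil => intro acc; rfl
  | cons v rest ih =>
    intro acc
    by_cases hn : is_version_newer current v
    · rw [List.foldl_cons, List.filter_cons_of_pos hn, List.foldl_cons]
      cases acc with
      | none => simp only [hn, Bool.true_and]; rw [ih]; rfl
      | some b =>
        simp only [hn, Bool.true_and]
        by_cases hlt : parse_version_tuple b < parse_version_tuple v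
        · rw [if_pos (by simp [hlt]), ih]
          simp [pvStep, hlt]
        · rw [if_neg (by simp [hlt]), ih]
          simp [pvStep, hlt]
    · rw [List.foldl_cons, List.filter_cons_of_neg (by simp [hn]),
        if_neg (by simp [hn]), ih]

-- each of A's branches: sort-descending-and-test-the-head = max? of the newer-filtered pool
theorem pv_main_branch (pool : List String) (current : String) :
    (match @PySem.List.sorted String (List Int) List.instLinearOrder.toLT LinearOrder.toDecidableLT pool parse_version_tuple true with
     | [] => none
     | latest :: _ => if is_version_newer current latest then some latest else none)
    = (pool.filter (fun v => is_version_newer current v)).foldl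
        (@pvStep String (List Int) _ parse_version_tuple) none := by
  rcases h : @PySem.List.sorted String (List Int) List.instLinearOrder.toLT LinearOrder.toDecidableLT pool parse_version_tuple true with _ | ⟨latest, rest⟩
  · have : pool = [] := (@PySem.List.sorted_eq_nil_iff String (List Int) List.instLinearOrder.toLT LinearOrder.toDecidableLT pool parse_version_tuple true).mp h
    subst this
    simp
  · have hmem : latest ∈ pool := by
      refine (@PySem.List.mem_sorted String (List Int) List.instLinearOrder.toLT LinearOrder.toDecidableLT pool parse_version_tuple true latest).mp ?_
      rw [h]; exact List.mem_cons_self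
    have hmax : ∀ y ∈ pool, parse_version_tuple y ≤ parse_version_tuple latest :=
      PySem.List.key_head_sorted_rev_ge pool parse_version_tuple h
    have hM : @PySem.List.max? String (List Int) List.instLinearOrder.toLT LinearOrder.toDecidableLT pool parse_version_tuple = some latest :=
      pv_max?_eq_head_sorted_rev parse_version_tuple pool latest rest h
    by_cases hn : is_version_newer current latest
    · have hMf := pv_max?_filter parse_version_tuple (fun v => is_version_newer current v)
        pool latest hM hn
      dsimp only
      rw [if_pos hn, ← pv_max?_eq_foldl, hMf]
    · have hnone : pool.filter (fun v => is_version_newer current v) = [] := by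
        apply List.filter_eq_nil_iff.mpr
        intro y hy hny
        apply hn
        simp only [is_version_newer, decide_eq_true_eq] at hny ⊢
        exact pv_lex_take_trans (parse_version_tuple current)
          (parse_version_tuple y) (parse_version_tuple latest)
          hny ((hmax y hy).lt_or_eq)
      dsimp only
      rw [if_neg hn, hnone]
      rfl

-- ===== VERDICT (by name: the statement is the Claim_ definition above) =====
theorem find_latest_simple_version_spec : Claim_equal_find_latest_simple_version := by
  intro tags current _
  unfold Spec_find_latest_simple_version find_latest_simple_version find_latest_simple_version_alt
  simp only [altVersions_eq, altPre_eq, altKey_eq, altNewer_key_eq]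
  rw [pv_fused_foldl]
  by_cases hpre : is_prerelease current
  · simp only [hpre, if_true]
    cases hv : pvVersions tags with
    | nil => simp
    | cons v vs =>
      have hne : (v :: vs).isEmpty = false := rfl
      simp only [hne, Bool.false_eq_true, if_false]
      rw [pv_sorted_eq]
      exact pv_main_branch (v :: vs) current
  · simp only [hpre, Bool.false_eq_true, if_false]
    cases hv : pvVersions tags with
    | nil => simp
    | cons v vs =>
      have hne : (v :: vs).isEmpty = false := rfl
      simp only [hne, Bool.false_eq_true, if_false]
      cases hs : (v :: vs).filter (fun v => !is_prerelease v) with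
      | nil => simp
      | cons s0 ss =>
        have hse : (s0 :: ss).isEmpty = false := rfl
        simp only [hse, Bool.false_eq_true, if_false]
        rw [pv_sorted_eq]
        exact pv_main_branch (s0 :: ss) current
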